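-- pv_equiv track=rewrite | github.com/ALBA2CA/GESPRO | backend/excel/import_gantt.py | detectar_bloques_x
-- ===== SOURCE A (Python) =====
-- def detectar_bloques_x(filas, date_cols):
--     """Devuelve lista de intervalos (fecha_inicio, fecha_fin) según X."""
--     bloques = []
--     bloque_activo = None
--     col_prev = None
--
--     for col in date_cols:
--         valor = str(filas[col]).strip().lower()
--         if valor == 'x':
--             if not bloque_activo:
--                 bloque_activo = col
--         else:
--             if bloque_activo:
--                 bloques.append((bloque_activo, col_prev))
--                 bloque_activo = None
--         col_prev = col
--
--     if bloque_activo: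
--         bloques.append((bloque_activo, col_prev))
--
--     return bloques
-- ===== SOURCE B (Python) =====
-- def detectar_bloques_x(filas, date_cols):
--     """Devuelve lista de intervalos (fecha_inicio, fecha_fin) según X."""
--     def marcada(col):
--         return str(filas[col]).strip().lower() == 'x'
--
--     def fin_de_racha(cols, ultimo):
--         # advance past the marked run, returning its last column and the rest
--         while cols and marcada(cols[0]):
--             ultimo, cols = cols[0], cols[1:]
--         return ultimo, cols
--
--     bloques = []
--     cols = list(date_cols)
--     while cols:
--         c, cols = cols[0], cols[1:]
--         if marcada(c):
--             fin, cols = fin_de_racha(cols, c)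
--             bloques.append((c, fin))
--     return bloques
-- ===== Notes on version B (the rewrite author's own statement) =====
-- stated objective: alternative
-- what changed: Replaces A's single pass carrying bloque_activo/col_prev state with a post-loop flush by a run-oriented scan: each maximal run of 'x'-marked columns is consumed by a helper that returns its last column and the rest, emitting (start, end) directly, which also removes A's Python-truthiness dependence on the column name.
-- intended difference: On inputs where a column named '' is marked 'x' and starts a run of marked columns, A's 'if not bloque_activo' treats the stored name '' as falsy so A omits that block or starts it at the next marked column (e.g. returns [] for filas={'':'x'}, date_cols=['']), while B returns the run starting at '' ([('','')] there); B's value is intended since block detection should not depend on the column's name. — e.g. on detectar_bloques_x([("", "x")], [""]): A returns [], B returns [("", "")]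
import Mathlib
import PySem

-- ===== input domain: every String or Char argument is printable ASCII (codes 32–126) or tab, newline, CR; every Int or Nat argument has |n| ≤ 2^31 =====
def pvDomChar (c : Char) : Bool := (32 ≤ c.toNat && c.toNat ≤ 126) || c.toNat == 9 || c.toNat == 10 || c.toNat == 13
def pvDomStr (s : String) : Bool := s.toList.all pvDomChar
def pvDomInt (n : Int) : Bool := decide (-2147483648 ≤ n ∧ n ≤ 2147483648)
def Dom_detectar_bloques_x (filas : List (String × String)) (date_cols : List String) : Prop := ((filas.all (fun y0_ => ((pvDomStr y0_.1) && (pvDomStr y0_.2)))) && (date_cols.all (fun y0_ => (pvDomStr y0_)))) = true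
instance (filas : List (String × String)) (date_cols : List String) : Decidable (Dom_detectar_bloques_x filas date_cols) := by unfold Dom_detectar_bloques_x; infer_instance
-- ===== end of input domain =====

-- B replaces A's carried bloque_activo/col_prev state and post-loop flush by a direct scan over
-- marked runs (alternative decomposition); B also fixes A's Python-truthiness slip on a column
-- named "" (see D_ below).


-- shared by both ports, Pre_ and D_: first-match lookup in the assoc list (Python dict access),
-- and the normalized 'is this cell an x?' test str(filas[col]).strip().lower() == 'x'
def pvLookup? (filas : List (String × String)) (c : String) : Option String :=
  (filas.find? (fun p => p.1 == c)).map (·.2)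

def pvMarcada (filas : List (String × String)) (c : String) : Bool :=
  PySem.Str.lower (PySem.Str.strip ((pvLookup? filas c).getD "")) == "x"

-- ===== PORT A =====
-- Python truthiness of bloque_activo / col_prev: None and "" are falsy
def pvTruthy : Option String → Bool
  | none => false
  | some s => s != ""

-- the for-loop of A as structural recursion over date_cols carrying (bloques, bloque_activo, col_prev);
-- the [] case is the post-loop flush. (cp.getD "" is unreachable with cp = none: a block is only
-- appended after at least one iteration has set col_prev.)
def pvAgo (m : String → Bool) : List String → List (String × String) → Option String → Option String → List (String × String)
  | [], bloques, ba, cp => if pvTruthy ba then bloques ++ [(ba.getD "", cp.getD "")] else bloques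
  | c :: t, bloques, ba, cp =>
    if m c then
      if !pvTruthy ba then pvAgo m t bloques (some c) (some c)
      else pvAgo m t bloques ba (some c)
    else
      if pvTruthy ba then pvAgo m t (bloques ++ [(ba.getD "", cp.getD "")]) none (some c)
      else pvAgo m t bloques ba (some c)

def detectar_bloques_x (filas : List (String × String)) (date_cols : List String) : List (String × String) :=
  pvAgo (pvMarcada filas) date_cols [] none none

-- ===== PORT B =====
-- fin_de_racha: walk past the marked run, returning its last column and the remaining columns
def pvFinDeRacha (m : String → Bool) : List String → String → String × List String
  | [], ultimo => (ultimo, [])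
  | c :: t, ultimo => if m c then pvFinDeRacha m t c else (ultimo, c :: t)

theorem pvFinDeRacha_len_le (m : String → Bool) : ∀ (l : List String) (u : String),
    (pvFinDeRacha m l u).2.length ≤ l.length := by
  intro l
  induction l with
  | nil => intro u; simp [pvFinDeRacha]
  | cons c t ih =>
    intro u
    by_cases h : m c = true <;> simp [pvFinDeRacha, h]
    · exact le_trans (ih c) (Nat.le_succ _)

-- the outer while-loop of B: emit one (start, end) pair per marked run
def pvBloques (m : String → Bool) : List String → List (String × String)
  | [] => []
  | c :: t =>
    if m c then
      (c, (pvFinDeRacha m t c).1) :: pvBloques m (pvFinDeRacha m t c).2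
    else pvBloques m t
termination_by l => l.length
decreasing_by
  · exact Nat.lt_succ_of_le (pvFinDeRacha_len_le m t c)
  · exact Nat.lt_succ_self _

def detectar_bloques_x_alt (filas : List (String × String)) (date_cols : List String) : List (String × String) :=
  pvBloques (pvMarcada filas) date_cols

-- ===== PRECONDITION & SPEC =====
-- Pre_ excludes exactly the inputs where A raises KeyError: a date column missing from filas.
def Pre_detectar_bloques_x (filas : List (String × String)) (date_cols : List String) : Prop :=
  ∀ c ∈ date_cols, (pvLookup? filas c).isSome = true
instance (filas : List (String × String)) (date_cols : List String) : Decidable (Pre_detectar_bloques_x filas date_cols) := by unfold Pre_detectar_bloques_x; infer_instance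

def pvWitness_detectar_bloques_x : (List (String × String)) × List String :=
  ([("d1", "x"), ("d2", "")], ["d1", "d2"])

-- On inputs where some column named "" is marked 'x' and starts a run of marked columns (it is first,
-- or the previous date column is unmarked), A's `if not bloque_activo` treats the stored name "" as
-- falsy, so A drops or mis-starts that block, while B reports the run starting at ""; B's value is
-- the intended one since a column's name should not affect block detection.
def pvBadStart (m : String → Bool) : Bool → List String → Bool
  | _, [] => false
  | pm, c :: t => (!pm && m c && (c == "")) || pvBadStart m (m c) t

def D_detectar_bloques_x (filas : List (String × String)) (date_cols : List String) : Prop :=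
  pvBadStart (pvMarcada filas) false date_cols = true
instance (filas : List (String × String)) (date_cols : List String) : Decidable (D_detectar_bloques_x filas date_cols) := by unfold D_detectar_bloques_x; infer_instance

def Spec_detectar_bloques_x (filas : List (String × String)) (date_cols : List String) (out : List (String × String)) : Prop := ¬ D_detectar_bloques_x filas date_cols → out = detectar_bloques_x_alt filas date_cols
instance (filas : List (String × String)) (date_cols : List String) (out : List (String × String)) : Decidable (Spec_detectar_bloques_x filas date_cols out) := by unfold Spec_detectar_bloques_x; infer_instance

def pvDiffWitness_detectar_bloques_x : (List (String × String)) × List String :=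
  ([("", "x")], [""])
def pvDiffWitnessOut_detectar_bloques_x : (List (String × String)) × (List (String × String)) :=
  ([], [("", "")])

-- ===== CLAIM (what is proved, stated in full; the proofs are below) =====
def Claim_unchanged_detectar_bloques_x : Prop := ∀ (filas : List (String × String)) (date_cols : List String), Dom_detectar_bloques_x filas date_cols → Pre_detectar_bloques_x filas date_cols → Spec_detectar_bloques_x filas date_cols (detectar_bloques_x filas date_cols)
def Claim_exact_detectar_bloques_x : Prop := ∀ (filas : List (String × String)) (date_cols : List String), Dom_detectar_bloques_x filas date_cols → Pre_detectar_bloques_x filas date_cols → D_detectar_bloques_x filas date_cols → detectar_bloques_x filas date_cols ≠ detectar_bloques_x_alt filas date_cols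
def Claim_changed_detectar_bloques_x : Prop := Dom_detectar_bloques_x (pvDiffWitness_detectar_bloques_x.1) (pvDiffWitness_detectar_bloques_x.2) ∧ Pre_detectar_bloques_x (pvDiffWitness_detectar_bloques_x.1) (pvDiffWitness_detectar_bloques_x.2) ∧ D_detectar_bloques_x (pvDiffWitness_detectar_bloques_x.1) (pvDiffWitness_detectar_bloques_x.2) ∧ detectar_bloques_x (pvDiffWitness_detectar_bloques_x.1) (pvDiffWitness_detectar_bloques_x.2) = pvDiffWitnessOut_detectar_bloques_x.1 ∧ detectar_bloques_x_alt (pvDiffWitness_detectar_bloques_x.1) (pvDiffWitness_detectar_bloques_x.2) = pvDiffWitnessOut_detectar_bloques_x.2 ∧ pvDiffWitnessOut_detectar_bloques_x.1 ≠ pvDiffWitnessOut_detectar_bloques_x.2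

-- ===== LEMMAS AND PROOFS =====
-- simultaneous loop invariant: with no bad "" run start ahead,
--  * from the idle state (bloque_activo falsy) A appends exactly B's runs;
--  * from an active state (bloque_activo = s ≠ "", col_prev = p) A first closes the current run
--    (whose last column pvFinDeRacha computes) and then appends B's remaining runs.
theorem pvAgo_eq_pvBloques (m : String → Bool) : ∀ (l : List String),
    (∀ (bl : List (String × String)) (cp : Option String),
       pvBadStart m false l = false → pvAgo m l bl none cp = bl ++ pvBloques m l)
    ∧ (∀ (bl : List (String × String)) (s p : String), s ≠ "" →
       pvBadStart m true l = false →
       pvAgo m l bl (some s) (some p)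
         = (bl ++ [(s, (pvFinDeRacha m l p).1)]) ++ pvBloques m (pvFinDeRacha m l p).2) := by
  intro l
  induction l with
  | nil =>
    constructor
    · intro bl cp _; simp [pvAgo, pvTruthy, pvBloques]
    · intro bl s p hs _
      simp [pvAgo, pvTruthy, pvFinDeRacha, pvBloques, hs]
  | cons c t ih =>
    constructor
    · intro bl cp hbad
      by_cases hc : m c = true
      · have hbad' : (c == "") = false ∧ pvBadStart m true t = false := by
          simp [pvBadStart, hc] at hbad
          exact ⟨by simpa using hbad.1, hbad.2⟩
        have hc' : c ≠ "" := by simpa using hbad'.1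
        rw [show pvAgo m (c :: t) bl none cp = pvAgo m t bl (some c) (some c) by
              simp [pvAgo, pvTruthy, hc]]
        rw [ih.2 bl c c hc' hbad'.2]
        simp [pvBloques, hc]
      · have hbad' : pvBadStart m false t = false := by
          simp [pvBadStart, hc] at hbad; exact hbad
        rw [show pvAgo m (c :: t) bl none cp = pvAgo m t bl none (some c) by
              simp [pvAgo, pvTruthy, hc]]
        rw [ih.1 bl (some c) hbad']
        simp [pvBloques, hc]
    · intro bl s p hs hbad
      by_cases hc : m c = true
      · have hbad' : pvBadStart m true t = false := by
          simp [pvBadStart, hc] at hbad; exact hbad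
        rw [show pvAgo m (c :: t) bl (some s) (some p) = pvAgo m t bl (some s) (some c) by
              simp [pvAgo, pvTruthy, hs, hc]]
        rw [ih.2 bl s c hs hbad']
        simp [pvFinDeRacha, hc]
      · have hbad' : pvBadStart m false t = false := by
          simp [pvBadStart, hc] at hbad; exact hbad
        rw [show pvAgo m (c :: t) bl (some s) (some p)
              = pvAgo m t (bl ++ [(s, p)]) none (some c) by
              simp [pvAgo, pvTruthy, hs, hc]]
        rw [ih.1 (bl ++ [(s, p)]) (some c) hbad']
        simp [pvFinDeRacha, pvBloques, hc]

-- A's `if not bloque_activo` can only store a truthy (nonempty) name, so no emitted block of A starts at ""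
theorem pvAgo_fst_ne_empty (m : String → Bool) : ∀ (l : List String) (bl : List (String × String)) (ba cp : Option String),
    (∀ x ∈ bl, x.1 ≠ "") → ∀ x ∈ pvAgo m l bl ba cp, x.1 ≠ "" := by
  intro l
  induction l with
  | nil =>
    intro bl ba cp hbl x hx
    by_cases hba : pvTruthy ba = true
    · have hne : ba.getD "" ≠ "" := by
        cases ba with
        | none => simp [pvTruthy] at hba
        | some s => simpa [pvTruthy] using hba
      simp [pvAgo, hba] at hx
      rcases hx with h | h
      · exact hbl x h
      · rw [h]; exact hne
    · simp [pvAgo, Bool.eq_false_iff.mpr hba] at hx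
      exact hbl x hx
  | cons c t ih =>
    intro bl ba cp hbl x hx
    by_cases hc : m c = true
    · by_cases hba : pvTruthy ba = true
      · rw [show pvAgo m (c :: t) bl ba cp = pvAgo m t bl ba (some c) by
            simp [pvAgo, hc, hba]] at hx
        exact ih bl ba (some c) hbl x hx
      · rw [show pvAgo m (c :: t) bl ba cp = pvAgo m t bl (some c) (some c) by
            simp [pvAgo, hc, hba]] at hx
        exact ih bl (some c) (some c) hbl x hx
    · by_cases hba : pvTruthy ba = true
      · have hne : ba.getD "" ≠ "" := by
          cases ba with
          | none => simp [pvTruthy] at hba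
          | some s => simpa [pvTruthy] using hba
        rw [show pvAgo m (c :: t) bl ba cp = pvAgo m t (bl ++ [(ba.getD "", cp.getD "")]) none (some c) by
            simp [pvAgo, hc, hba]] at hx
        refine ih _ none (some c) ?_ x hx
        intro y hy
        simp at hy
        rcases hy with h | h
        · exact hbl y h
        · rw [h]; exact hne
      · rw [show pvAgo m (c :: t) bl ba cp = pvAgo m t bl ba (some c) by
            simp [pvAgo, hc, Bool.eq_false_iff.mpr hba]] at hx
        exact ih bl ba (some c) hbl x hx

-- threading pvBadStart past a marked run lands on the rest that pvFinDeRacha returns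
theorem pvBadStart_true_eq (m : String → Bool) : ∀ (l : List String) (u : String),
    pvBadStart m true l = pvBadStart m false (pvFinDeRacha m l u).2 := by
  intro l
  induction l with
  | nil => intro u; simp [pvFinDeRacha, pvBadStart]
  | cons c t ih =>
    intro u
    by_cases hc : m c = true
    · simp [pvBadStart, pvFinDeRacha, hc]; exact ih c
    · simp [pvBadStart, pvFinDeRacha, hc]

-- whenever D_ holds, B emits a block starting at ""
theorem pvBloques_exists_empty (m : String → Bool) : ∀ (n : Nat) (l : List String), l.length ≤ n →
    pvBadStart m false l = true → ∃ e, ("", e) ∈ pvBloques m l := by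
  intro n
  induction n with
  | zero =>
    intro l hl hbad
    rw [List.length_eq_zero_iff.mp (Nat.le_zero.mp hl)] at hbad
    simp [pvBadStart] at hbad
  | succ n ih =>
    intro l hl hbad
    cases l with
    | nil => simp [pvBadStart] at hbad
    | cons c t =>
      by_cases hc : m c = true
      · by_cases hce : c = ""
        · subst hce
          exact ⟨(pvFinDeRacha m t "").1, by simp [pvBloques, hc]⟩
        · have hbad' : pvBadStart m true t = true := by
            simp [pvBadStart, hc, hce] at hbad; exact hbad
          rw [pvBadStart_true_eq m t c] at hbad'
          obtain ⟨e, he⟩ := ih (pvFinDeRacha m t c).2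
            (le_trans (pvFinDeRacha_len_le m t c) (Nat.le_of_succ_le_succ hl)) hbad'
          exact ⟨e, by simp [pvBloques, hc]; right; exact he⟩
      · have hbad' : pvBadStart m false t = true := by
          simp [pvBadStart, hc] at hbad; exact hbad
        obtain ⟨e, he⟩ := ih t (Nat.le_of_succ_le_succ hl) hbad'
        exact ⟨e, by simp [pvBloques, hc]; exact he⟩

-- ===== VERDICT (by name: the statement is the Claim_ definition above) =====
theorem detectar_bloques_x_spec : Claim_unchanged_detectar_bloques_x := by
  intro filas date_cols _ _ hD
  have hbad : pvBadStart (pvMarcada filas) false date_cols = false := by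
    unfold D_detectar_bloques_x at hD
    exact Bool.eq_false_iff.mpr hD
  unfold detectar_bloques_x detectar_bloques_x_alt
  simpa using (pvAgo_eq_pvBloques (pvMarcada filas) date_cols).1 [] none hbad

theorem detectar_bloques_x_changed : Claim_changed_detectar_bloques_x := by
  unfold Claim_changed_detectar_bloques_x
  refine ⟨by decide, by decide, by decide, by decide, ?_, by decide⟩
  simp [detectar_bloques_x_alt, pvDiffWitness_detectar_bloques_x,
        pvDiffWitnessOut_detectar_bloques_x, pvBloques, pvFinDeRacha, pvMarcada, pvLookup?]
  decide

theorem detectar_bloques_x_tight : Claim_exact_detectar_bloques_x := by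
  intro filas date_cols _ _ hD heq
  obtain ⟨e, he⟩ := pvBloques_exists_empty (pvMarcada filas) date_cols.length date_cols
    le_rfl hD
  have he' : ("", e) ∈ detectar_bloques_x filas date_cols := by rw [heq]; exact he
  exact pvAgo_fst_ne_empty (pvMarcada filas) date_cols [] none none (by simp) ("", e) he' rfl
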